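-- pv_equiv track=rewrite | github.com/Erasimos/AoC_2016 | Day_13/Day_13.py | is_open_pos
-- ===== SOURCE A (Python) =====
-- def is_open_pos(position):
--     x = position[0]
--     y = position[1]
--
--     favourite_number = 1364
--     wall_sum = x*x + 3*x + 2*x*y + y + y*y + favourite_number
--     binary_sum = str(bin(wall_sum))
--     # Count the number of 1's
--     one_count = 0
--     for bit in binary_sum:
--         if bit == '1':
--             one_count += 1
--     # Check if number of 1's is even
--     if one_count % 2 == 0:
--         return True
--     else:
--         return False
-- ===== SOURCE B (Python) =====
-- def is_open_pos(position):
--     x = position[0]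
--     y = position[1]
--
--     favourite_number = 1364
--     wall_sum = x*x + 3*x + 2*x*y + y + y*y + favourite_number
--     # Parity of set bits via Kernighan's trick: clear the lowest set bit each step.
--     n = abs(wall_sum)
--     parity = 0
--     while n:
--         parity ^= 1
--         n &= n - 1
--     return parity == 0
-- ===== Notes on version B (the rewrite author's own statement) =====
-- stated objective: idiomatic
-- what changed: Replaces the bin()-string construction and per-character scan by a Kernighan bit-clearing loop (n &= n-1) that maintains a parity accumulator, one iteration per set bit.
import Mathlib
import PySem

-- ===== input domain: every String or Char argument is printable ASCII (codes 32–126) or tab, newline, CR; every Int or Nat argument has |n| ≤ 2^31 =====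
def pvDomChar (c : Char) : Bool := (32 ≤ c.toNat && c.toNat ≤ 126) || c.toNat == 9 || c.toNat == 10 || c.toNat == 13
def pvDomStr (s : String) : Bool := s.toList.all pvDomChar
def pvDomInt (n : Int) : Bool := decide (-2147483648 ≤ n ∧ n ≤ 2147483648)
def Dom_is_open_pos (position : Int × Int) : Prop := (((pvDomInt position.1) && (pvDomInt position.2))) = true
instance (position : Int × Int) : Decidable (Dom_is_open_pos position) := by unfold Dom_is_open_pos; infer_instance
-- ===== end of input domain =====

-- B replaces A's bin()-string scan by a Kernighan bit-clearing parity loop (idiomatic; same result).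


-- ===== PORT A =====
-- literal port of A: build bin(wall_sum) as a string, scan its characters counting '1's
def is_open_pos (position : Int × Int) : Bool :=
  let x := position.1
  let y := position.2
  let favourite_number : Int := 1364
  let wall_sum := x*x + 3*x + 2*x*y + y + y*y + favourite_number
  let binary_sum := PySem.Int.pyBin wall_sum
  let one_count := binary_sum.toList.foldl (fun c bit => if bit = '1' then c + 1 else c) (0 : Int)
  if one_count % 2 == 0 then true else false

-- ===== PORT B =====
-- the while loop of Source B: clear the lowest set bit, flip parity, until n = 0
def kernLoop (n parity : Nat) : Nat :=
  if h : n = 0 then parity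
  else kernLoop (n &&& (n - 1)) (parity ^^^ 1)
termination_by n
decreasing_by
  exact Nat.lt_of_le_of_lt Nat.and_le_right (Nat.sub_lt (Nat.pos_of_ne_zero h) one_pos)

def is_open_pos_alt (position : Int × Int) : Bool :=
  let x := position.1
  let y := position.2
  let favourite_number : Int := 1364
  let wall_sum := x*x + 3*x + 2*x*y + y + y*y + favourite_number
  let n := wall_sum.natAbs
  let parity := kernLoop n 0
  parity == 0

-- ===== PRECONDITION & SPEC =====
def Spec_is_open_pos (position : Int × Int) (out : Bool) : Prop := out = is_open_pos_alt position
instance (position : Int × Int) (out : Bool) : Decidable (Spec_is_open_pos position out) := by unfold Spec_is_open_pos; infer_instance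

-- ===== CLAIM (what is proved, stated in full; the proofs are below) =====
def Claim_equal_is_open_pos : Prop := ∀ (position : Int × Int), Dom_is_open_pos position → Spec_is_open_pos position (is_open_pos position)

-- ===== LEMMAS AND PROOFS =====

-- reference popcount by halving
def bitcnt (n : Nat) : Nat :=
  if n = 0 then 0 else n % 2 + bitcnt (n / 2)
termination_by n
decreasing_by exact Nat.div_lt_self (Nat.pos_of_ne_zero (by assumption)) one_lt_two

theorem bitcnt_eq (n : Nat) : bitcnt n = if n = 0 then 0 else n % 2 + bitcnt (n / 2) := by
  conv_lhs => rw [bitcnt]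

theorem bitcnt_zero : bitcnt 0 = 0 := by rw [bitcnt_eq]; rfl

theorem bitcnt_two_mul (k : Nat) : bitcnt (2 * k) = bitcnt k := by
  by_cases hk : k = 0
  · subst hk; rfl
  · rw [bitcnt_eq]
    have h1 : 2 * k ≠ 0 := by omega
    simp [h1, Nat.mul_div_cancel_left k (by norm_num : 0 < 2), Nat.mul_mod_right]

theorem bitcnt_two_mul_add_one (k : Nat) : bitcnt (2 * k + 1) = 1 + bitcnt k := by
  rw [bitcnt_eq]
  have h2 : (2 * k + 1) % 2 = 1 := by omega
  have h3 : (2 * k + 1) / 2 = k := by omega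
  simp [h2, h3]

-- (2m+a) &&& (2n+b) = 2(m &&& n) + (a &&& b) for a,b bits, via Nat.land_bit
theorem and_step (m n : Nat) (a b : Bool) :
    (2 * m + a.toNat) &&& (2 * n + b.toNat) = 2 * (m &&& n) + (a && b).toNat := by
  cases a <;> cases b
  · simpa [Nat.bit, two_mul, Nat.add_assoc] using Nat.land_bit false m false n
  · simpa [Nat.bit, two_mul, Nat.add_assoc] using Nat.land_bit false m true n
  · simpa [Nat.bit, two_mul, Nat.add_assoc] using Nat.land_bit true m false n
  · simpa [Nat.bit, two_mul, Nat.add_assoc] using Nat.land_bit true m true n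

-- key step: clearing the lowest set bit removes exactly one 1-bit
theorem bitcnt_and_pred (n : Nat) (hn : n ≠ 0) : bitcnt (n &&& (n - 1)) + 1 = bitcnt n := by
  induction n using Nat.strong_induction_on with
  | _ n ih =>
    rcases Nat.even_or_odd n with he | ho
    · -- n = 2k, k > 0 : n-1 = 2(k-1)+1
      obtain ⟨k, hk'⟩ := he
      have hk : n = 2 * k := by omega
      have hk0 : k ≠ 0 := by omega
      have hn1 : n - 1 = 2 * (k - 1) + 1 := by omega
      have hand : n &&& (n - 1) = 2 * (k &&& (k - 1)) := by
        have h := and_step k (k - 1) false true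
        simpa [← hk, ← hn1] using h
      rw [hand, bitcnt_two_mul]
      have hih := ih k (by omega) hk0
      have hk2 : bitcnt n = bitcnt k := by rw [hk, bitcnt_two_mul]
      omega
    · -- n = 2k+1 : n-1 = 2k, and = 2k
      obtain ⟨k, hk⟩ := ho
      have hn1 : n - 1 = 2 * k := by omega
      have hand : n &&& (n - 1) = 2 * k := by
        have h := and_step k k true false
        simp [Nat.and_self] at h
        rw [hk]
        have h2 : 2 * k + 1 - 1 = 2 * k := by omega
        rw [h2]
        exact h
      rw [hand, bitcnt_two_mul, hk, bitcnt_two_mul_add_one]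
      omega

theorem kernLoop_eq (n : Nat) : ∀ p, kernLoop n p = p ^^^ (bitcnt n % 2) := by
  induction n using Nat.strong_induction_on with
  | _ n ih =>
    intro p
    unfold kernLoop
    by_cases h : n = 0
    · simp [h, bitcnt_zero]
    · have hlt : n &&& (n - 1) < n :=
        Nat.lt_of_le_of_lt Nat.and_le_right (Nat.sub_lt (Nat.pos_of_ne_zero h) one_pos)
      simp only [h, dif_neg, not_false_iff]
      rw [ih _ hlt]
      have hb := bitcnt_and_pred n h
      have h1 : bitcnt n % 2 = (1 ^^^ (bitcnt (n &&& (n - 1)) % 2)) := by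
        rcases Nat.even_or_odd (bitcnt (n &&& (n - 1))) with he | ho
        · have h2 : bitcnt (n &&& (n - 1)) % 2 = 0 := Nat.even_iff.mp he
          simp [h2]; omega
        · have h2 : bitcnt (n &&& (n - 1)) % 2 = 1 := Nat.odd_iff.mp ho
          simp [h2]; omega
      rw [h1, ← Nat.xor_assoc]

-- the counting fold over a char list is List.count '1'
theorem foldl_count (l : List Char) : ∀ c : Int,
    l.foldl (fun c bit => if bit = '1' then c + 1 else c) c = c + (l.count '1' : Nat) := by
  induction l with
  | nil => intro c; simp
  | cons x xs ih =>
    intro c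
    by_cases hx : x = '1'
    · simp [hx, ih]; ring
    · simp [List.foldl, hx, ih]

-- count of '1' among the binary digits of m equals bitcnt m
theorem toDigitsCore_count (f : Nat) : ∀ (n : Nat) (acc : List Char), n < f →
    (Nat.toDigitsCore 2 f n acc).count '1' = bitcnt n + acc.count '1' := by
  induction f with
  | zero => intro n acc h; omega
  | succ f ih =>
    intro n acc h
    unfold Nat.toDigitsCore
    by_cases hz : n / 2 = 0
    · simp only [hz, if_pos]
      have hn : n = 0 ∨ n = 1 := by omega
      rcases hn with h0 | h0 <;> subst h0
      · simp [Nat.digitChar, bitcnt_eq]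
      · simp [Nat.digitChar, bitcnt_eq]
        omega
    · simp only [hz, if_neg, not_false_iff]
      have hnz : n ≠ 0 := by omega
      rw [ih (n / 2) _ (by omega)]
      have hb : bitcnt n = n % 2 + bitcnt (n / 2) := by rw [bitcnt_eq]; simp [hnz]
      rw [hb, List.count_cons]
      by_cases h1 : n % 2 = 1
      · simp [h1, Nat.digitChar]; omega
      · have h0 : n % 2 = 0 := by omega
        simp [h0, Nat.digitChar]

theorem toDigits_count (m : Nat) : (Nat.toDigits 2 m).count '1' = bitcnt m := by
  unfold Nat.toDigits
  rw [toDigitsCore_count (m + 1) m [] (by omega)]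
  simp

-- count of '1' in bin(w) equals bitcnt |w|
theorem pyBin_count (w : Int) :
    ((PySem.Int.pyBin w).toList.count '1') = bitcnt w.natAbs := by
  rw [PySem.Int.toList_pyBin]
  unfold PySem.Int.toBinChars0b
  by_cases hw : w < 0
  · simp [hw, toDigits_count]
  · have : w.toNat = w.natAbs := by omega
    simp [hw, this, toDigits_count]

-- ===== VERDICT (by name: the statement is the Claim_ definition above) =====
theorem is_open_pos_spec : Claim_equal_is_open_pos := by
  intro position _
  unfold Spec_is_open_pos is_open_pos is_open_pos_alt
  simp only []
  set w : Int := position.1*position.1 + 3*position.1 + 2*position.1*position.2 +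
    position.2 + position.2*position.2 + 1364 with hw
  rw [foldl_count, pyBin_count, kernLoop_eq]
  rcases Nat.even_or_odd (bitcnt w.natAbs) with he | ho
  · have h2 : bitcnt w.natAbs % 2 = 0 := Nat.even_iff.mp he
    simp [h2]; omega
  · have h2 : bitcnt w.natAbs % 2 = 1 := Nat.odd_iff.mp ho
    simp [h2]; omega
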